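-- pv_equiv track=rewrite | github.com/amirbaa1/Cipher_Algorithms | Cipher.py | Alg_Multiplicative_Cipher
-- ===== SOURCE A (Python) =====
-- def negasht(code):
--     dict_str = {
--         "A": 0,
--         "B": 1,
--         "C": 2,
--         "D": 3,
--         "E": 4,
--         "F": 5,
--         "G": 6,
--         "H": 7,
--         "I": 8,
--         "J": 9,
--         "K": 10,
--         "L": 11,
--         "M": 12,
--         "N": 13,
--         "O": 14,
--         "P": 15,
--         "Q": 16,
--         "R": 17,
--         "S": 18,
--         "T": 19,
--         "U": 20,
--         "V": 21,
--         "W": 22,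
--         "X": 23,
--         "Y": 24,
--         "Z": 25
--     }
--
--     dict_int = {
--         0: "A",
--         1: "B",
--         2: "C",
--         3: "D",
--         4: "E",
--         5: "F",
--         6: "G",
--         7: "H",
--         8: "I",
--         9: "J",
--         10: "K",
--         11: "L",
--         12: "M",
--         13: "N",
--         14: "O",
--         15: "P",
--         16: "Q",
--         17: "R",
--         18: "S",
--         19: "T",
--         20: "U",
--         21: "V",
--         22: "W",
--         23: "X",
--         24: "Y",
--         25: "Z"
--     }
--
--     if isinstance(code, str):
--         return dict_str.get(code.upper(), None)
--     if isinstance(code, int):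
--         return dict_int.get(code, None)
--     return None
--
-- def Alg_Multiplicative_Cipher(text, key):
--     word_list = []
--
--     for char in text:
--         if char.isalpha():
--             x = negasht(char.upper())
--             if x is not None:
--                 code = (x * key) % 26
--                 word = negasht(code)
--                 word_list.append(word)
--         elif char == ' ':
--             word_list.append(' ')
--
--     return ''.join(word_list)
-- ===== SOURCE B (Python) =====
-- def Alg_Multiplicative_Cipher(text, key):
--     # Precompute the ciphered alphabet once, install it in a full ASCII
--     # translation table (letters -> cipher letter, space kept, everything
--     # else deleted), then translate the text in one bulk operation.
--     enc = [chr(i * key % 26 + 65) for i in range(26)]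
--     table = {i: None for i in range(128)}
--     table[32] = ' '
--     for i in range(26):
--         table[65 + i] = enc[i]
--         table[97 + i] = enc[i]
--     return text.translate(table)
-- ===== Notes on version B (the rewrite author's own statement) =====
-- stated objective: faster
-- what changed: Replaced A's per-character pipeline (isalpha test, upper(), two dictionary lookups through the negasht helper rebuilt on every call, append-and-join) by a precomputed substitution data structure: the 26-letter cipher alphabet is computed once, installed in a full 128-entry translation table (letters mapped, space kept, other characters deleted), and the text is converted by one bulk str.translate call.
import Mathlib
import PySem

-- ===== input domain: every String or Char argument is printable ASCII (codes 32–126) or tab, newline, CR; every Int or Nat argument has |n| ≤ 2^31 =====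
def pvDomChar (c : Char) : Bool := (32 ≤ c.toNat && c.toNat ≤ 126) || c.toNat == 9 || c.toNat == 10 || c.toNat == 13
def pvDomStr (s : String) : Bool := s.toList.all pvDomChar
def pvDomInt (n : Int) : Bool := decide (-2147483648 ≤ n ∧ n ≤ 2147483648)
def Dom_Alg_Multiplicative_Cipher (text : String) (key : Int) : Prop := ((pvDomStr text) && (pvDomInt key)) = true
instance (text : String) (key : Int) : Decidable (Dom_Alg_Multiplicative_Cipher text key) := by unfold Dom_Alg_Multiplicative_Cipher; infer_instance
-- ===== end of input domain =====

-- B replaces A's per-character pipeline (negasht helper rebuilding two 26-entry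
-- dictionaries per letter, append-and-join loop) by a precomputed 128-entry
-- translation table applied with one bulk translate pass (alternative data structure).


-- ===== PORT A =====
def dict_str : PySem.Dict String Int := PySem.Dict.ofList [("A", 0), ("B", 1), ("C", 2), ("D", 3), ("E", 4), ("F", 5), ("G", 6), ("H", 7), ("I", 8), ("J", 9), ("K", 10), ("L", 11), ("M", 12), ("N", 13), ("O", 14), ("P", 15), ("Q", 16), ("R", 17), ("S", 18), ("T", 19), ("U", 20), ("V", 21), ("W", 22), ("X", 23), ("Y", 24), ("Z", 25)]

def dict_int : PySem.Dict Int String := PySem.Dict.ofList [((0 : Int), "A"), ((1 : Int), "B"), ((2 : Int), "C"), ((3 : Int), "D"), ((4 : Int), "E"), ((5 : Int), "F"), ((6 : Int), "G"), ((7 : Int), "H"), ((8 : Int), "I"), ((9 : Int), "J"), ((10 : Int), "K"), ((11 : Int), "L"), ((12 : Int), "M"), ((13 : Int), "N"), ((14 : Int), "O"), ((15 : Int), "P"), ((16 : Int), "Q"), ((17 : Int), "R"), ((18 : Int), "S"), ((19 : Int), "T"), ((20 : Int), "U"), ((21 : Int), "V"), ((22 : Int), "W"), ((23 : Int), "X"),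 ((24 : Int), "Y"), ((25 : Int), "Z")]

-- Python's negasht dispatches on the argument's type; A calls it once with a str and
-- once with an int, so the port splits it into the two corresponding branches.
def negasht_str (code : String) : Option Int := PySem.Dict.get? dict_str (PySem.Str.upper code)

def negasht_int (code : Int) : Option String := PySem.Dict.get? dict_int code

-- the loop body of A, named so the proofs can speak about one iteration
def cipherStep (key : Int) (word_list : List String) (char : Char) : List String :=
  if PySem.Chars.isalpha char then
    (match negasht_str (String.ofList [PySem.Chars.upperChar char]) with
    | some x =>
        let code := PySem.Int.mod (x * key) 26
        (match negasht_int code with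
         | some word => word_list ++ [word]
         | none => word_list ++ [""])  -- Python appends None here and ''.join would raise; unreachable (code ∈ [0, 26))
     | none => word_list)
  else if char = ' ' then word_list ++ [" "] else word_list

def Alg_Multiplicative_Cipher (text : String) (key : Int) : String :=
  PySem.Str.join "" (text.toList.foldl (cipherStep key) [])

-- ===== PORT B =====
-- enc = [chr(i * key % 26 + 65) for i in range(26)]
def encList (key : Int) : List String :=
  (PySem.List.pyRange 0 26 1).map
    (fun i => String.ofList [Char.ofNat (PySem.Int.mod (i * key) 26 + 65).toNat])

-- table = {i: None for i in range(128)}; table[32] = ' '; then the 26-iteration loop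
def transTable (key : Int) : PySem.Dict Int (Option String) :=
  let base : PySem.Dict Int (Option String) :=
    (PySem.List.pyRange 0 128 1).foldl (fun d i => PySem.Dict.insert d i none) PySem.Dict.empty
  (PySem.List.pyRange 0 26 1).foldl
    (fun d i =>
      let e := PySem.List.pyGetD (encList key) i ""   -- enc[i]; i ∈ [0, 26) so always in range
      PySem.Dict.insert (PySem.Dict.insert d (65 + i) (some e)) (97 + i) (some e))
    (PySem.Dict.insert base 32 (some " "))

-- hand port of str.translate for a dict keyed by code point (missing key keeps the
-- char, None deletes it, a string substitutes it) — exact for the table built above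
def pyTranslate (table : PySem.Dict Int (Option String)) (s : String) : String :=
  String.ofList (s.toList.flatMap (fun c =>
    match PySem.Dict.get? table ((c.toNat : Int)) with
    | none => [c]
    | some none => []
    | some (some r) => r.toList))

def Alg_Multiplicative_Cipher_alt (text : String) (key : Int) : String :=
  pyTranslate (transTable key) text

-- ===== PRECONDITION & SPEC =====
def Spec_Alg_Multiplicative_Cipher (text : String) (key : Int) (out : String) : Prop := out = Alg_Multiplicative_Cipher_alt text key
instance (text : String) (key : Int) (out : String) : Decidable (Spec_Alg_Multiplicative_Cipher text key out) := by unfold Spec_Alg_Multiplicative_Cipher; infer_instance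

-- ===== CLAIM (what is proved, stated in full; the proofs are below) =====
def Claim_equal_Alg_Multiplicative_Cipher : Prop := ∀ (text : String) (key : Int), Dom_Alg_Multiplicative_Cipher text key → Spec_Alg_Multiplicative_Cipher text key (Alg_Multiplicative_Cipher text key)

-- ===== LEMMAS AND PROOFS =====

-- proof-side description of one character's contribution (A's branch structure in arithmetic form)
def encChar (c : Char) (key : Int) : Option String :=
  if PySem.Chars.isalpha c then
    some (String.ofList [Char.ofNat (PySem.Int.mod ((((PySem.Chars.upperChar c).toNat : Int) - 65) * key) 26 + 65).toNat])
  else if c = ' ' then some " "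
  else none

-- shorthand for the i-th cipher-alphabet letter
def encStr (key i : Int) : String :=
  String.ofList [Char.ofNat (PySem.Int.mod (i * key) 26 + 65).toNat]

-- On domain chars that are alphabetic, the string dictionary returns exactly ord(upper) - 65.
set_option maxRecDepth 8192 in
theorem negasht_str_alpha (c : Char) (hdom : pvDomChar c = true) (ha : PySem.Chars.isalpha c = true) :
    negasht_str (String.ofList [PySem.Chars.upperChar c]) = some (((PySem.Chars.upperChar c).toNat : Int) - 65) := by
  have hle : c.toNat < 127 := by
    simp [pvDomChar] at hdom
    omega
  have key : ∀ n : Nat, n < 127 → PySem.Chars.isalpha (Char.ofNat n) = true →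
      negasht_str (String.ofList [PySem.Chars.upperChar (Char.ofNat n)]) =
        some (((PySem.Chars.upperChar (Char.ofNat n)).toNat : Int) - 65) := by decide
  have hc : Char.ofNat c.toNat = c := Char.ofNat_toNat c
  have := key c.toNat hle (by rw [hc]; exact ha)
  rwa [hc] at this

-- The int dictionary on 0 ≤ m < 26 is exactly chr(m + 65).
theorem negasht_int_eq (m : Int) (h0 : 0 ≤ m) (h26 : m < 26) :
    negasht_int m = some (String.ofList [Char.ofNat (m + 65).toNat]) := by
  interval_cases m <;> rfl

-- One loop iteration of A appends exactly what encChar yields for that char.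
theorem cipherStep_eq (key : Int) (acc : List String) (c : Char) (hdom : pvDomChar c = true) :
    cipherStep key acc c = acc ++ (encChar c key).toList := by
  by_cases ha : PySem.Chars.isalpha c = true
  · have hx := negasht_str_alpha c hdom ha
    have hcode0 : 0 ≤ PySem.Int.mod ((((PySem.Chars.upperChar c).toNat : Int) - 65) * key) 26 :=
      PySem.Int.mod_nonneg _ (by norm_num)
    have hcode26 : PySem.Int.mod ((((PySem.Chars.upperChar c).toNat : Int) - 65) * key) 26 < 26 :=
      PySem.Int.mod_lt _ (by norm_num)
    simp only [cipherStep, encChar, ha, if_pos, hx]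
    rw [negasht_int_eq _ hcode0 hcode26]
    simp
  · by_cases hsp : c = ' '
    · subst hsp
      simp [cipherStep, encChar, show PySem.Chars.isalpha ' ' = false from by decide]
    · simp [cipherStep, encChar, ha, hsp]

-- A's whole loop builds exactly the filter-map of encChar, for any starting accumulator.
theorem foldl_cipherStep (key : Int) (cs : List Char) (acc : List String)
    (hdom : cs.all pvDomChar = true) :
    cs.foldl (cipherStep key) acc = acc ++ cs.filterMap (fun c => encChar c key) := by
  induction cs generalizing acc with
  | nil => simp
  | cons c cs ih =>
      simp only [List.all_cons, Bool.and_eq_true] at hdom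
      simp only [List.foldl_cons, List.filterMap_cons]
      rw [ih _ hdom.2, cipherStep_eq key acc c hdom.1]
      cases encChar c key <;> simp

-- B-side: lookup through the base table {i: None for i in range(128)}.
theorem get?_base_range (n : Int) : ∀ (k : Nat) (a : Int) (d : PySem.Dict Int (Option String)),
    (128 - a).toNat = k →
    PySem.Dict.get? ((PySem.List.pyRange a 128 1).foldl (fun d i => PySem.Dict.insert d i none) d) n
      = if a ≤ n ∧ n < 128 then some none else PySem.Dict.get? d n := by
  intro k
  induction k with
  | zero =>
      intro a d hk
      rw [PySem.List.pyRange_one_eq_nil (by omega)]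
      simp only [List.foldl_nil]
      rw [if_neg (by omega)]
  | succ k ih =>
      intro a d hk
      rw [PySem.List.pyRange_one_cons (by omega)]
      simp only [List.foldl_cons]
      rw [ih (a + 1) _ (by omega), PySem.Dict.get?_insert]
      split_ifs <;> first | rfl | omega

-- B-side: lookup after the 26-iteration letter loop.
theorem get?_letter_loop (key n : Int) : ∀ (k : Nat) (a : Int) (d : PySem.Dict Int (Option String)),
    (26 - a).toNat = k → 0 ≤ a →
    PySem.Dict.get? ((PySem.List.pyRange a 26 1).foldl
        (fun d i =>
          let e := PySem.List.pyGetD (encList key) i ""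
          PySem.Dict.insert (PySem.Dict.insert d (65 + i) (some e)) (97 + i) (some e)) d) n
      = if 65 + a ≤ n ∧ n < 91 then some (some (encStr key (n - 65)))
        else if 97 + a ≤ n ∧ n < 123 then some (some (encStr key (n - 97)))
        else PySem.Dict.get? d n := by
  intro k
  induction k with
  | zero =>
      intro a d hk ha
      rw [PySem.List.pyRange_one_eq_nil (by omega)]
      simp only [List.foldl_nil]
      rw [if_neg (by omega), if_neg (by omega)]
  | succ k ih =>
      intro a d hk ha
      rw [PySem.List.pyRange_one_cons (by omega)]
      simp only [List.foldl_cons]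
      rw [ih (a + 1) _ (by omega) (by omega)]
      have he : PySem.List.pyGetD (encList key) a "" = encStr key a := by
        unfold encList encStr
        rw [PySem.List.pyGetD_map_pyRange_of_nonneg _ _ _ _ ha (by omega)]
      rw [PySem.Dict.get?_insert, PySem.Dict.get?_insert, he]
      split_ifs <;> first | rfl | omega | (congr 3; omega)

-- full characterization of the translation table
theorem get?_transTable (key n : Int) :
    PySem.Dict.get? (transTable key) n
      = if 65 ≤ n ∧ n < 91 then some (some (encStr key (n - 65)))
        else if 97 ≤ n ∧ n < 123 then some (some (encStr key (n - 97)))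
        else if n = 32 then some (some " ")
        else if 0 ≤ n ∧ n < 128 then some none
        else none := by
  unfold transTable
  rw [get?_letter_loop key n ((26 - 0 : Int).toNat) 0 _ rfl le_rfl,
      PySem.Dict.get?_insert, get?_base_range n ((128 - 0 : Int).toNat) 0 _ rfl,
      PySem.Dict.get?_empty]
  split_ifs <;> first | rfl | omega

-- each domain character's translation equals its encChar contribution
theorem piece_eq_encChar (key : Int) (c : Char) (hdom : pvDomChar c = true) :
    (match PySem.Dict.get? (transTable key) ((c.toNat : Int)) with
      | none => [c]
      | some none => []
      | some (some r) => r.toList)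
      = (match encChar c key with | none => [] | some s => s.toList) := by
  have hlt : c.toNat < 127 := by
    simp [pvDomChar] at hdom
    omega
  have hupperU : ∀ m : Nat, m < 127 → 65 ≤ m → m ≤ 90 →
      PySem.Chars.isalpha (Char.ofNat m) = true ∧
        PySem.Chars.upperChar (Char.ofNat m) = Char.ofNat m := by decide
  have hupperL : ∀ m : Nat, m < 127 → 97 ≤ m → m ≤ 122 →
      PySem.Chars.isalpha (Char.ofNat m) = true ∧
        (PySem.Chars.upperChar (Char.ofNat m)).toNat = m - 32 := by decide
  have hnon : ∀ m : Nat, m < 127 → ¬ (65 ≤ m ∧ m ≤ 90) → ¬ (97 ≤ m ∧ m ≤ 122) →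
      PySem.Chars.isalpha (Char.ofNat m) = false := by decide
  have hc : Char.ofNat c.toNat = c := Char.ofNat_toNat c
  rw [get?_transTable]
  by_cases hU : 65 ≤ c.toNat ∧ c.toNat ≤ 90
  · obtain ⟨ha, hu⟩ := hupperU c.toNat hlt hU.1 hU.2
    rw [hc] at ha hu
    rw [if_pos (by omega)]
    simp only [encChar, ha, if_pos, hu]
    have : (((c.toNat : Nat) : Int) - 65) = ((c.toNat : Int) - 65) := rfl
    unfold encStr
    rfl
  · by_cases hL : 97 ≤ c.toNat ∧ c.toNat ≤ 122
    · obtain ⟨ha, hu⟩ := hupperL c.toNat hlt hL.1 hL.2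
      rw [hc] at ha hu
      rw [if_neg (by omega), if_pos (by omega)]
      simp only [encChar, ha, if_pos]
      have harg : (((PySem.Chars.upperChar c).toNat : Int) - 65) = (c.toNat : Int) - 97 := by
        rw [hu]
        push_cast [Nat.cast_sub (by omega : 32 ≤ c.toNat)]
        omega
      rw [harg]
      unfold encStr
      rfl
    · have ha : PySem.Chars.isalpha c = false := by
        have := hnon c.toNat hlt hU hL
        rwa [hc] at this
      by_cases hsp : c = ' '
      · subst hsp
        rw [if_neg (by decide), if_neg (by decide), if_pos (by decide)]
        simp [encChar, show PySem.Chars.isalpha ' ' = false from by decide]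
      · have h32 : (c.toNat : Int) ≠ 32 := by
          intro h
          apply hsp
          have : c.toNat = 32 := by omega
          rw [← hc, this]
        rw [if_neg (by omega), if_neg (by omega), if_neg h32, if_pos (by omega)]
        simp [encChar, ha, hsp]

-- ''.join on char lists is list flattening
theorem joinNil : ∀ (xss : List (List Char)), PySem.Chars.join [] xss = xss.flatten
  | [] => rfl
  | [x] => by rw [PySem.Chars.join_singleton]; simp
  | x :: y :: ys => by rw [PySem.Chars.join_cons_cons, joinNil (y :: ys)]; simp

-- joining the filter-mapped strings with '' equals flat-mapping the translations
theorem join_filterMap (key : Int) (cs : List Char) (hdom : cs.all pvDomChar = true) :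
    PySem.Chars.join [] ((cs.filterMap (fun c => encChar c key)).map String.toList)
      = cs.flatMap (fun c =>
          match PySem.Dict.get? (transTable key) ((c.toNat : Int)) with
          | none => [c]
          | some none => []
          | some (some r) => r.toList) := by
  rw [joinNil]
  induction cs with
  | nil => rfl
  | cons c cs ih =>
      simp only [List.all_cons, Bool.and_eq_true] at hdom
      rw [List.flatMap_cons, piece_eq_encChar key c hdom.1, ← ih hdom.2]
      cases hec : encChar c key <;> simp [hec]

-- ===== VERDICT (by name: the statement is the Claim_ definition above) =====
theorem Alg_Multiplicative_Cipher_spec : Claim_equal_Alg_Multiplicative_Cipher := by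
  intro text key hdom
  have hstr : pvDomStr text = true := by
    unfold Dom_Alg_Multiplicative_Cipher at hdom
    exact (Bool.and_eq_true _ _ ▸ hdom).1
  unfold Spec_Alg_Multiplicative_Cipher Alg_Multiplicative_Cipher Alg_Multiplicative_Cipher_alt pyTranslate
  apply String.ext
  rw [foldl_cipherStep key text.toList [] hstr]
  simp only [List.nil_append, PySem.Str.toList_join]
  rw [show ("".toList : List Char) = [] from rfl, join_filterMap key text.toList hstr]
  simp
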